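-- pv_equiv track=rewrite | github.com/mic1928/graduation_thesis | TSP_3D探索/make_3d_array.py | first_process
-- ===== SOURCE A (Python) =====
-- def first_process(input_array):   #同じ要素を持つタプルを削除
--     co = input_array.copy()
--     for i in range(len(co)-1):
--         flag = 0
--         for j in range(len(co[i]) - 1, -1, -1):
--             if co[i][j][1] == co[i][j][2]:
--                 co[i][j] = co[i+1][j]
--                 flag = 1
--             elif flag == 1:
--                 co[i][j] = co[i+1][j]
--     return co[:-1]
-- ===== SOURCE B (Python) =====
-- def first_process(input_array):   # find-pivot-then-bulk-copy decomposition of A's reverse scan with flag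
--     co = input_array.copy()
--     for i in range(len(co) - 1):
--         row = co[i]
--         nxt = co[i + 1]
--         p = -1
--         for j in range(len(row)):
--             if row[j][1] == row[j][2]:
--                 p = j
--         for j in range(p + 1):
--             row[j] = nxt[j]
--     return co[:-1]
-- ===== Notes on version B (the rewrite author's own statement) =====
-- stated objective: alternative
-- what changed: Replaces the reverse scan with a propagating flag by a two-pass per-row decomposition: an ascending scan finds the pivot (largest column with equal 2nd and 3rd entries), then a bulk copy replaces all columns up to the pivot from the next row.
import Mathlib
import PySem

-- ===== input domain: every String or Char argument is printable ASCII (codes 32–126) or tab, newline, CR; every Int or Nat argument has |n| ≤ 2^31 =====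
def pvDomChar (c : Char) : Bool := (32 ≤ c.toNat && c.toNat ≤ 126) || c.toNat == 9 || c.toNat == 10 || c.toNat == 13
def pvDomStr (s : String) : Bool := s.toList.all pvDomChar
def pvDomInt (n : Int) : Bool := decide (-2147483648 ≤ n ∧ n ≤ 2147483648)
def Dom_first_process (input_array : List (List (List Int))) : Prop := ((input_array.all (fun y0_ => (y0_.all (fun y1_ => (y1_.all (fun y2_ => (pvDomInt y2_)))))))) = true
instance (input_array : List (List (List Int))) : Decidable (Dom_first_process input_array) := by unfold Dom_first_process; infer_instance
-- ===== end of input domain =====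

-- B replaces A's reverse scan with a propagating flag by a find-pivot-then-bulk-copy decomposition
-- (objective: alternative, same cost). A mutates the shared row lists in place; B performs the same
-- mutation in Python; the equivalence proved here is about the RETURN value.

-- ===== PORT A =====
-- one step of A's inner reverse loop: state (row-so-far, flag), index j
def fpStep (next : List (List Int)) (st : List (List Int) × Int) (j : Int) :
    List (List Int) × Int :=
  if (st.1.getD j.toNat []).getD 1 0 = (st.1.getD j.toNat []).getD 2 0 then
    (st.1.set j.toNat (next.getD j.toNat []), 1)
  else if st.2 = 1 then
    (st.1.set j.toNat (next.getD j.toNat []), st.2)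
  else st

-- A's inner loop: for j in range(len(row)-1, -1, -1)
def fpInner (row next : List (List Int)) : List (List Int) :=
  ((PySem.List.pyRange ((row.length : Int) - 1) (-1) (-1)).foldl (fpStep next) (row, 0)).1

def first_process (input_array : List (List (List Int))) : List (List (List Int)) :=
  let co := input_array
  let co := (PySem.List.pyRange 0 ((co.length : Int) - 1) 1).foldl
      (fun c i => c.set i.toNat (fpInner (c.getD i.toNat []) (c.getD (i.toNat + 1) []))) co
  PySem.List.slice co none (some (-1))

-- ===== PORT B =====
-- B's first pass: pivot = index of last column j with row[j][1] == row[j][2], else -1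
def fpPivot (row : List (List Int)) : Int :=
  (PySem.List.pyRange 0 (row.length : Int) 1).foldl
    (fun p j =>
      if (row.getD j.toNat []).getD 1 0 = (row.getD j.toNat []).getD 2 0 then j else p) (-1)

-- B's second pass: for j in range(p+1): row[j] = nxt[j]
def fpCopy (row next : List (List Int)) (p : Int) : List (List Int) :=
  (PySem.List.pyRange 0 (p + 1) 1).foldl
    (fun r j => r.set j.toNat (next.getD j.toNat [])) row

def first_process_alt (input_array : List (List (List Int))) : List (List (List Int)) :=
  let co := input_array
  let co := (PySem.List.pyRange 0 ((co.length : Int) - 1) 1).foldl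
      (fun c i =>
        let row := c.getD i.toNat []
        let nxt := c.getD (i.toNat + 1) []
        c.set i.toNat (fpCopy row nxt (fpPivot row))) co
  PySem.List.slice co none (some (-1))

-- ===== PRECONDITION & SPEC =====
-- Pre_ excludes exactly the inputs on which A raises IndexError: a non-last row containing an
-- inner list of length < 3, or a matching column j of row i with no column j in row i+1.
def Pre_first_process (input_array : List (List (List Int))) : Prop :=
  ∀ i < input_array.length - 1, ∀ j < (input_array.getD i []).length,
    3 ≤ ((input_array.getD i []).getD j []).length ∧
    (((input_array.getD i []).getD j []).getD 1 0 = ((input_array.getD i []).getD j []).getD 2 0 →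
      j < (input_array.getD (i + 1) []).length)
instance (input_array : List (List (List Int))) : Decidable (Pre_first_process input_array) := by
  unfold Pre_first_process; infer_instance

def pvWitness_first_process : List (List (List Int)) :=
  [[[1, 2, 2], [3, 4, 5]], [[9, 9, 9], [7, 8, 9]]]

def Spec_first_process (input_array : List (List (List Int))) (out : List (List (List Int))) : Prop := out = first_process_alt input_array
instance (input_array : List (List (List Int))) (out : List (List (List Int))) : Decidable (Spec_first_process input_array out) := by unfold Spec_first_process; infer_instance

-- ===== CLAIM (what is proved, stated in full; the proofs are below) =====
def Claim_equal_first_process : Prop := ∀ (input_array : List (List (List Int))), Dom_first_process input_array → Pre_first_process input_array → Spec_first_process input_array (first_process input_array)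

-- ===== LEMMAS AND PROOFS =====

-- `copyN next t r` = r with indices 0..t-1 overwritten from next (Nat-indexed normal form of fpCopy)
def copyN (next : List (List Int)) (t : Nat) (r : List (List Int)) : List (List Int) :=
  (List.range t).foldl (fun r j => r.set j (next.getD j [])) r

-- pivot of the first k columns, recursively (normal form of fpPivot)
def pvAux (row : List (List Int)) : Nat → Int
  | 0 => -1
  | k + 1 =>
      if (row.getD k []).getD 1 0 = (row.getD k []).getD 2 0 then (k : Int) else pvAux row k

theorem getD_set_ne (r : List (List Int)) (i j : Nat) (v : List Int) (h : i ≠ j) :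
    (r.set i v).getD j [] = r.getD j [] := by
  simp [List.getD_eq_getElem?_getD, List.getElem?_set_ne h]

theorem copyN_succ (next : List (List Int)) (t : Nat) (r : List (List Int)) :
    copyN next (t + 1) r = (copyN next t r).set t (next.getD t []) := by
  simp [copyN, List.range_succ]

theorem copyN_set_comm (next : List (List Int)) (t : Nat) (r : List (List Int)) (m : Nat)
    (v : List Int) (ht : t ≤ m) : copyN next t (r.set m v) = (copyN next t r).set m v := by
  induction t with
  | zero => simp [copyN]
  | succ t ih =>
      rw [copyN_succ, copyN_succ, ih (by omega), List.set_comm _ _ (by omega : t ≠ m)]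

theorem fpPivot_eq (row : List (List Int)) : fpPivot row = pvAux row row.length := by
  have key : ∀ k : Nat, (PySem.List.pyRange 0 (k : Int) 1).foldl
      (fun p j =>
        if (row.getD j.toNat []).getD 1 0 = (row.getD j.toNat []).getD 2 0 then j else p) (-1)
      = pvAux row k := by
    intro k
    induction k with
    | zero => rw [PySem.List.pyRange_one_eq_nil (by omega)]; rfl
    | succ k ih =>
        rw [show ((k + 1 : Nat) : Int) = (k : Int) + 1 by push_cast; ring,
          PySem.List.pyRange_one_succ_right (by omega), List.foldl_append, ih]
        simp only [List.foldl_cons, List.foldl_nil, Int.toNat_natCast]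
        rfl
  exact key row.length

theorem fpCopy_aux (next : List (List Int)) : ∀ (t : Nat) (r : List (List Int)),
    (PySem.List.pyRange 0 (t : Int) 1).foldl
      (fun r j => r.set j.toNat (next.getD j.toNat [])) r = copyN next t r := by
  intro t
  induction t with
  | zero => intro r; rw [PySem.List.pyRange_one_eq_nil (by omega)]; rfl
  | succ t ih =>
      intro r
      rw [show ((t + 1 : Nat) : Int) = (t : Int) + 1 by push_cast; ring,
        PySem.List.pyRange_one_succ_right (by omega), List.foldl_append, ih, copyN_succ]
      simp only [List.foldl_cons, List.foldl_nil, Int.toNat_natCast]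

theorem fpCopy_eq (row next : List (List Int)) (p : Int) :
    fpCopy row next p = copyN next (p + 1).toNat row := by
  unfold fpCopy
  rcases le_or_gt (p + 1) 0 with h | h
  · rw [PySem.List.pyRange_one_eq_nil h, show (p + 1).toNat = 0 by omega]
    rfl
  · rw [show (p + 1) = (((p + 1).toNat : Nat) : Int) by omega]
    exact fpCopy_aux next (p + 1).toNat row

theorem fpDesc (next row : List (List Int)) : ∀ (k : Nat) (r : List (List Int)) (flag : Int),
    (∀ j, j < k → r.getD j [] = row.getD j []) →
    ((PySem.List.pyRange ((k : Int) - 1) (-1) (-1)).foldl (fpStep next) (r, flag)).1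
      = copyN next (if flag = 1 then k else (pvAux row k + 1).toNat) r := by
  intro k
  induction k with
  | zero =>
      intro r flag _
      rw [PySem.List.pyRange_neg_one_eq_nil (by norm_num)]
      split <;> simp [copyN, pvAux]
  | succ k ih =>
      intro r flag hr
      have hget : r.getD k [] = row.getD k [] := hr k (Nat.lt_succ_self k)
      rw [show ((k + 1 : Nat) : Int) - 1 = (k : Int) by push_cast; ring,
        PySem.List.pyRange_neg_one_cons (by omega : (-1 : Int) < (k : Int))]
      simp only [List.foldl_cons]
      by_cases hc : (row.getD k []).getD 1 0 = (row.getD k []).getD 2 0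
      · -- condition true at k: copy, flag := 1
        have hstep : fpStep next (r, flag) (k : Int)
            = (r.set k (next.getD k []), 1) := by
          unfold fpStep
          simp only [Int.toNat_natCast]
          rw [hget, if_pos hc]
        rw [hstep, ih _ 1 (fun j hj => by
          rw [getD_set_ne _ _ _ _ (by omega)]; exact hr j (by omega))]
        have hcs : copyN next k (r.set k (next.getD k []))
            = copyN next (k + 1) r := by
          rw [copyN_set_comm _ _ _ _ _ (le_refl k), copyN_succ]
        have hp : (pvAux row (k + 1) + 1).toNat = k + 1 := by
          simp only [pvAux, if_pos hc]; omega
        rw [if_pos rfl, hcs, hp, ite_self]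
      · by_cases hf : flag = 1
        · -- flag already set: copy regardless
          have hstep : fpStep next (r, flag) (k : Int)
              = (r.set k (next.getD k []), flag) := by
            unfold fpStep
            simp only [Int.toNat_natCast]
            rw [hget, if_neg hc, if_pos hf]
          rw [hstep, ih _ flag (fun j hj => by
            rw [getD_set_ne _ _ _ _ (by omega)]; exact hr j (by omega))]
          rw [if_pos hf, if_pos hf, copyN_set_comm _ _ _ _ _ (le_refl k), copyN_succ]
        · -- nothing happens at k
          have hstep : fpStep next (r, flag) (k : Int) = (r, flag) := by
            unfold fpStep
            simp only [Int.toNat_natCast]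
            rw [hget, if_neg hc, if_neg hf]
          rw [hstep, ih _ flag (fun j hj => hr j (by omega))]
          have hp : pvAux row (k + 1) = pvAux row k := by
            simp only [pvAux, if_neg hc]
          rw [if_neg hf, if_neg hf, hp]

theorem inner_eq (row next : List (List Int)) :
    fpInner row next = fpCopy row next (fpPivot row) := by
  unfold fpInner
  rw [fpDesc next row row.length row 0 (fun _ _ => rfl), fpCopy_eq, fpPivot_eq]
  norm_num

-- ===== VERDICT (by name: the statement is the Claim_ definition above) =====
theorem first_process_spec : Claim_equal_first_process := by
  intro a _ _
  unfold Spec_first_process first_process first_process_alt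
  simp only [inner_eq]
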